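-- pv_equiv track=rewrite | github.com/megatAhmad/portfolio_taai_lessonlearnt | src/ui/utils.py | get_equipment_type_from_tag
-- ===== SOURCE A (Python) =====
-- from typing import List, Dict, Any, Optional
--
-- def get_equipment_type_from_tag(tag: Optional[str]) -> Optional[str]:
--     """
--     Extract equipment type from an equipment tag.
--
--     Args:
--         tag: Equipment tag (e.g., "P-101", "HX-205")
--
--     Returns:
--         Equipment type or None
--     """
--     if not tag:
--         return None
--
--     tag = tag.upper().strip()
--
--     # Common prefixes and their types
--     prefix_types = {
--         "P-": "pump",
--         "HX-": "heat_exchanger",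
--         "E-": "exchanger",
--         "V-": "valve",
--         "C-": "compressor",
--         "T-": "tank",
--         "TK-": "tank",
--         "M-": "motor",
--         "R-": "reactor",
--         "COL-": "column",
--         "FAN-": "fan",
--         "BLW-": "blower",
--     }
--
--     for prefix, eq_type in prefix_types.items():
--         if tag.startswith(prefix):
--             return eq_type
--
--     return None
-- ===== SOURCE B (Python) =====
-- _TYPES = {
--     "P": "pump",
--     "HX": "heat_exchanger",
--     "E": "exchanger",
--     "V": "valve",
--     "C": "compressor",
--     "T": "tank",
--     "TK": "tank",
--     "M": "motor",
--     "R": "reactor",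
--     "COL": "column",
--     "FAN": "fan",
--     "BLW": "blower",
-- }
--
--
-- def get_equipment_type_from_tag(tag):
--     if not tag:
--         return None
--     head, sep, _ = tag.upper().strip().partition("-")
--     if not sep:
--         return None
--     return _TYPES.get(head)
-- ===== Notes on version B (the rewrite author's own statement) =====
-- stated objective: idiomatic
-- what changed: Instead of scanning the twelve dash-terminated prefixes with startswith one by one, B parses the tag once (partition at the first dash) and does a single dict lookup of the bare prefix; the linear prefix scan disappears.
import Mathlib
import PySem

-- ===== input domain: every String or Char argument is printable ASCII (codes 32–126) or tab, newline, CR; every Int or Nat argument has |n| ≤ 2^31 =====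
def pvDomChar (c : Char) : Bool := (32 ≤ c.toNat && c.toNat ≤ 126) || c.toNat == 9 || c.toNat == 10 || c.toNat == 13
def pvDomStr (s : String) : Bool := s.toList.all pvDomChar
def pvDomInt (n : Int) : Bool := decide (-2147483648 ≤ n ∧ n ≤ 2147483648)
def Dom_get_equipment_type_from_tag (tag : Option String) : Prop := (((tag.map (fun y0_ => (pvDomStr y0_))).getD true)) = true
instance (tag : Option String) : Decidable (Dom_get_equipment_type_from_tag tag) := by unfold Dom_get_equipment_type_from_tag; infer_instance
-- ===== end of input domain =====

-- B replaces A's one-by-one startswith scan over twelve dash-terminated prefixes by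
-- parsing the tag once (partition at the first dash) and a single dict lookup (idiomatic).

-- ===== PORT A =====
-- the literal prefix_types dict, in insertion order (iterated in order by the loop)
def pvPrefixTypes : List (List Char × String) :=
  [(['P', '-'], "pump"), (['H', 'X', '-'], "heat_exchanger"), (['E', '-'], "exchanger"),
   (['V', '-'], "valve"), (['C', '-'], "compressor"), (['T', '-'], "tank"),
   (['T', 'K', '-'], "tank"), (['M', '-'], "motor"), (['R', '-'], "reactor"),
   (['C', 'O', 'L', '-'], "column"), (['F', 'A', 'N', '-'], "fan"),
   (['B', 'L', 'W', '-'], "blower")]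

-- the 'for prefix, eq_type in prefix_types.items(): if tag.startswith(prefix): return eq_type' loop
def pvScan (cs : List Char) : List (List Char × String) → Option String
  | [] => none
  | (p, ty) :: rest => if PySem.Chars.startswith cs p then some ty else pvScan cs rest

def get_equipment_type_from_tag (tag : Option String) : Option String :=
  match tag with
  | none => none
  | some s =>
    if s.toList.isEmpty then none  -- 'if not tag'
    else pvScan (PySem.Chars.strip (PySem.Chars.upper s.toList)) pvPrefixTypes

-- ===== PORT B =====
def pvTypesDict : PySem.Dict String String :=
  PySem.Dict.ofList
    [("P", "pump"), ("HX", "heat_exchanger"), ("E", "exchanger"), ("V", "valve"),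
     ("C", "compressor"), ("T", "tank"), ("TK", "tank"), ("M", "motor"),
     ("R", "reactor"), ("COL", "column"), ("FAN", "fan"), ("BLW", "blower")]

def get_equipment_type_from_tag_alt (tag : Option String) : Option String :=
  match tag with
  | none => none
  | some s =>
    if s.toList.isEmpty then none  -- 'if not tag'
    else
      let cs := PySem.Chars.strip (PySem.Chars.upper s.toList)
      -- exact hand port of str.partition("-") for the one-char separator "-":
      -- head = text before the first '-', sep is nonempty iff a '-' occurs
      let head := cs.takeWhile (fun c => c ≠ '-')
      let sep := cs.dropWhile (fun c => c ≠ '-')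
      if sep.isEmpty then none  -- 'if not sep'
      else PySem.Dict.get? pvTypesDict (String.ofList head)

-- ===== PRECONDITION & SPEC =====
def Spec_get_equipment_type_from_tag (tag : Option String) (out : Option String) : Prop := out = get_equipment_type_from_tag_alt tag
instance (tag : Option String) (out : Option String) : Decidable (Spec_get_equipment_type_from_tag tag out) := by unfold Spec_get_equipment_type_from_tag; infer_instance

-- ===== CLAIM (what is proved, stated in full; the proofs are below) =====
def Claim_equal_get_equipment_type_from_tag : Prop := ∀ (tag : Option String), Dom_get_equipment_type_from_tag tag → Spec_get_equipment_type_from_tag tag (get_equipment_type_from_tag tag)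

-- ===== LEMMAS AND PROOFS =====

-- the first element that dropWhile keeps falsifies the predicate
theorem pv_dropWhile_head_false (p : Char → Bool) (cs : List Char) (c : Char) (tl : List Char)
    (h : List.dropWhile p cs = c :: tl) : p c = false := by
  induction cs with
  | nil => simp at h
  | cons a l ih =>
    rw [List.dropWhile_cons] at h
    split at h
    · exact ih h
    · next hp => cases h; simpa using hp

-- startswith on a dash-terminated prefix ↔ partition head equals the bare prefix and a dash occurs
theorem pv_startswith_iff (cs X : List Char) (hX : '-' ∉ X) :
    PySem.Chars.startswith cs (X ++ ['-']) = true ↔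
      (cs.takeWhile (fun c => c ≠ '-') = X ∧ cs.dropWhile (fun c => c ≠ '-') ≠ []) := by
  have hall : ∀ x ∈ X, ¬ x = '-' := fun x hx h => hX (h ▸ hx)
  rw [PySem.Chars.startswith_iff]
  constructor
  · rintro ⟨t, ht⟩
    subst ht
    constructor
    · rw [List.append_assoc, List.takeWhile_append]
      simp
      exact fun _ => hall
    · rw [List.append_assoc, List.dropWhile_append]
      simp
      rw [if_pos hall]
      simp
  · rintro ⟨hh, hd⟩
    rcases hcase : cs.dropWhile (fun c => c ≠ '-') with _ | ⟨c, tl⟩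
    · exact absurd hcase hd
    · have hc : c = '-' := by
        have := pv_dropWhile_head_false _ _ _ _ hcase
        simpa using this
      refine ⟨tl, ?_⟩
      have := List.takeWhile_append_dropWhile (p := fun c => decide (c ≠ '-')) (l := cs)
      rw [hh, hcase, hc] at this
      simpa using this

-- a String equals ofList l iff its char list equals l
theorem pv_str_eq (s : String) (l : List Char) : (s = String.ofList l) ↔ (s.toList = l) := by
  constructor
  · rintro rfl; simp
  · intro h; subst h; simp

-- the literal dict lookup, as an if-chain over the bare prefix
theorem pv_dict (h : List Char) :
    PySem.Dict.get? pvTypesDict (String.ofList h) =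
      (if ['P'] = h then some "pump" else if ['H', 'X'] = h then some "heat_exchanger" else if ['E'] = h then some "exchanger" else if ['V'] = h then some "valve" else if ['C'] = h then some "compressor" else if ['T'] = h then some "tank" else if ['T', 'K'] = h then some "tank" else if ['M'] = h then some "motor" else if ['R'] = h then some "reactor" else if ['C', 'O', 'L'] = h then some "column" else if ['F', 'A', 'N'] = h then some "fan" else if ['B', 'L', 'W'] = h then some "blower" else none) := by
  have hmk : pvTypesDict = PySem.Dict.mk
      [("P", "pump"), ("HX", "heat_exchanger"), ("E", "exchanger"), ("V", "valve"),
       ("C", "compressor"), ("T", "tank"), ("TK", "tank"), ("M", "motor"),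
       ("R", "reactor"), ("COL", "column"), ("FAN", "fan"), ("BLW", "blower")] := by decide
  rw [hmk]
  simp only [PySem.Dict.get?_mk_cons]
  simp [PySem.Dict.get?, beq_iff_eq, pv_str_eq]

-- core equality of the two tails, for an arbitrary (already uppercased/stripped) char list
theorem pv_core (cs : List Char) :
    pvScan cs pvPrefixTypes =
      (if (cs.dropWhile (fun c => c ≠ '-')).isEmpty then none
       else PySem.Dict.get? pvTypesDict (String.ofList (cs.takeWhile (fun c => c ≠ '-')))) := by
  by_cases hd : cs.dropWhile (fun c => c ≠ '-') = []
  · -- no dash occurs: every dash-terminated prefix fails, and B returns none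
    have hno : ∀ X : List Char, '-' ∉ X → PySem.Chars.startswith cs (X ++ ['-']) = false := by
      intro X hX
      rcases h : PySem.Chars.startswith cs (X ++ ['-']) with _ | _
      · rfl
      · exact absurd hd ((pv_startswith_iff cs X hX).mp h).2
    simp only [pvScan, pvPrefixTypes, hd, List.isEmpty_nil, if_true]
    rw [show (['P', '-'] : List Char) = ['P'] ++ ['-'] from rfl, hno ['P'] (by decide)]
    rw [show (['H', 'X', '-'] : List Char) = ['H', 'X'] ++ ['-'] from rfl, hno ['H', 'X'] (by decide)]
    rw [show (['E', '-'] : List Char) = ['E'] ++ ['-'] from rfl, hno ['E'] (by decide)]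
    rw [show (['V', '-'] : List Char) = ['V'] ++ ['-'] from rfl, hno ['V'] (by decide)]
    rw [show (['C', '-'] : List Char) = ['C'] ++ ['-'] from rfl, hno ['C'] (by decide)]
    rw [show (['T', '-'] : List Char) = ['T'] ++ ['-'] from rfl, hno ['T'] (by decide)]
    rw [show (['T', 'K', '-'] : List Char) = ['T', 'K'] ++ ['-'] from rfl, hno ['T', 'K'] (by decide)]
    rw [show (['M', '-'] : List Char) = ['M'] ++ ['-'] from rfl, hno ['M'] (by decide)]
    rw [show (['R', '-'] : List Char) = ['R'] ++ ['-'] from rfl, hno ['R'] (by decide)]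
    rw [show (['C', 'O', 'L', '-'] : List Char) = ['C', 'O', 'L'] ++ ['-'] from rfl, hno ['C', 'O', 'L'] (by decide)]
    rw [show (['F', 'A', 'N', '-'] : List Char) = ['F', 'A', 'N'] ++ ['-'] from rfl, hno ['F', 'A', 'N'] (by decide)]
    rw [show (['B', 'L', 'W', '-'] : List Char) = ['B', 'L', 'W'] ++ ['-'] from rfl, hno ['B', 'L', 'W'] (by decide)]
    simp
  · -- a dash occurs: each startswith test is exactly 'partition head = bare prefix'
    have hiff : ∀ X : List Char, '-' ∉ X →
        PySem.Chars.startswith cs (X ++ ['-']) = decide (X = cs.takeWhile (fun c => c ≠ '-')) := by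
      intro X hX
      rcases h : PySem.Chars.startswith cs (X ++ ['-']) with _ | _
      · symm; simp only [decide_eq_false_iff_not]
        intro hh
        have := (pv_startswith_iff cs X hX).mpr ⟨hh.symm, hd⟩
        simp [h] at this
      · symm; simp only [decide_eq_true_eq]
        exact ((pv_startswith_iff cs X hX).mp h).1.symm
    have hde : (cs.dropWhile (fun c => c ≠ '-')).isEmpty = false := by
      simpa [List.isEmpty_iff] using hd
    simp only [pvScan, pvPrefixTypes, hde]
    rw [show (['P', '-'] : List Char) = ['P'] ++ ['-'] from rfl, hiff ['P'] (by decide)]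
    rw [show (['H', 'X', '-'] : List Char) = ['H', 'X'] ++ ['-'] from rfl, hiff ['H', 'X'] (by decide)]
    rw [show (['E', '-'] : List Char) = ['E'] ++ ['-'] from rfl, hiff ['E'] (by decide)]
    rw [show (['V', '-'] : List Char) = ['V'] ++ ['-'] from rfl, hiff ['V'] (by decide)]
    rw [show (['C', '-'] : List Char) = ['C'] ++ ['-'] from rfl, hiff ['C'] (by decide)]
    rw [show (['T', '-'] : List Char) = ['T'] ++ ['-'] from rfl, hiff ['T'] (by decide)]
    rw [show (['T', 'K', '-'] : List Char) = ['T', 'K'] ++ ['-'] from rfl, hiff ['T', 'K'] (by decide)]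
    rw [show (['M', '-'] : List Char) = ['M'] ++ ['-'] from rfl, hiff ['M'] (by decide)]
    rw [show (['R', '-'] : List Char) = ['R'] ++ ['-'] from rfl, hiff ['R'] (by decide)]
    rw [show (['C', 'O', 'L', '-'] : List Char) = ['C', 'O', 'L'] ++ ['-'] from rfl, hiff ['C', 'O', 'L'] (by decide)]
    rw [show (['F', 'A', 'N', '-'] : List Char) = ['F', 'A', 'N'] ++ ['-'] from rfl, hiff ['F', 'A', 'N'] (by decide)]
    rw [show (['B', 'L', 'W', '-'] : List Char) = ['B', 'L', 'W'] ++ ['-'] from rfl, hiff ['B', 'L', 'W'] (by decide)]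
    rw [pv_dict]
    generalize cs.takeWhile (fun c => c ≠ '-') = h
    simp

-- ===== VERDICT (by name: the statement is the Claim_ definition above) =====
theorem get_equipment_type_from_tag_spec : Claim_equal_get_equipment_type_from_tag := by
  intro tag _
  unfold Spec_get_equipment_type_from_tag get_equipment_type_from_tag get_equipment_type_from_tag_alt
  match tag with
  | none => rfl
  | some s =>
    by_cases he : s.toList.isEmpty
    · simp [he]
    · simp only [he]
      exact pv_core _
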